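-- pv_equiv track=rewrite | github.com/shuichi/RenjuTransformer | src/renju_transformer/rules.py | line_points_through
-- ===== SOURCE A (Python) =====
-- BOARD_SIZE = 15
--
-- def idx_to_rc(index: int) -> tuple[int, int]:
--     return divmod(index, BOARD_SIZE)
--
-- def rc_to_idx(row: int, col: int) -> int:
--     return row * BOARD_SIZE + col
--
-- def inside(row: int, col: int) -> bool:
--     return 0 <= row < BOARD_SIZE and 0 <= col < BOARD_SIZE
--
-- def line_points_through(index: int, dr: int, dc: int) -> list[int]:
--     row, col = idx_to_rc(index)
--     while inside(row - dr, col - dc):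
--         row -= dr
--         col -= dc
--
--     points: list[int] = []
--     while inside(row, col):
--         points.append(rc_to_idx(row, col))
--         row += dr
--         col += dc
--     return points
-- ===== SOURCE B (Python) =====
-- def line_points_through(index: int, dr: int, dc: int) -> list[int]:
--     row, col = divmod(index, 15)
--
--     def ray(r: int, c: int, sr: int, sc: int) -> list[int]:
--         pts: list[int] = []
--         while 0 <= r < 15 and 0 <= c < 15:
--             pts.append(r * 15 + c)
--             r += sr
--             c += sc
--         return pts
--
--     return ray(row - dr, col - dc, -dr, -dc)[::-1] + ray(row, col, dr, dc)
-- ===== Notes on version B (the rewrite author's own statement) =====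
-- stated objective: alternative
-- what changed: Instead of rewinding to the line's on-board start and then doing one forward collecting pass, B scans backward from the point (collecting, then reversed) and forward from the point (collecting), and concatenates the two lists; Pre_ excludes dr=dc=0 with the index on the board, where A's first while loop diverges (B diverges identically).
import Mathlib
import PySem

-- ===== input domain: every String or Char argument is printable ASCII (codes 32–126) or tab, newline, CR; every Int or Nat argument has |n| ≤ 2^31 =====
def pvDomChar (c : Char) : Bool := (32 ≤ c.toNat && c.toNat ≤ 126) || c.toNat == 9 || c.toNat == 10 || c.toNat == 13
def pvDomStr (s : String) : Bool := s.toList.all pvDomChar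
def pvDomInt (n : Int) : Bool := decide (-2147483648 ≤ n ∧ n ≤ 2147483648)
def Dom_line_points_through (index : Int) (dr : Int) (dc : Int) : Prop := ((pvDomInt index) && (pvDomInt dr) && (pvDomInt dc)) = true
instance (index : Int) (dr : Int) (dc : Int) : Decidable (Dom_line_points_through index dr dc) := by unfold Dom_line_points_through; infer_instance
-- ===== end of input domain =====

-- B replaces A's rewind-to-the-edge-then-one-forward-scan by two independent scans from the
-- given point (backward list reversed, then forward list); objective: alternative decomposition.

-- shared module helpers (idx_to_rc is inlined as floordiv/mod at the call sites)
def pvRcToIdx (r c : Int) : Int := r * 15 + c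
def pvInside (r c : Int) : Bool := decide (0 ≤ r ∧ r < 15 ∧ 0 ≤ c ∧ c < 15)

-- ===== PORT A =====
-- first while loop: rewind while the previous cell is inside (fuel 20 only totalizes; it is
-- never exhausted on Pre_ inputs since at most 15 cells of a line with (dr,dc) ≠ (0,0) are inside)
def pvRewind : Nat → Int → Int → Int → Int → Int × Int
  | 0, r, c, _, _ => (r, c)
  | n+1, r, c, dr, dc =>
      if pvInside (r - dr) (c - dc) then pvRewind n (r - dr) (c - dc) dr dc else (r, c)

-- second while loop: append while inside, stepping forward
def pvForwardA : Nat → Int → Int → Int → Int → List Int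
  | 0, _, _, _, _ => []
  | n+1, r, c, dr, dc =>
      if pvInside r c then pvRcToIdx r c :: pvForwardA n (r + dr) (c + dc) dr dc else []

def line_points_through (index : Int) (dr : Int) (dc : Int) : List Int :=
  let row := PySem.Int.floordiv index 15
  let col := PySem.Int.mod index 15
  let p := pvRewind 20 row col dr dc
  pvForwardA 20 p.1 p.2 dr dc

-- ===== PORT B =====
-- B's single `ray` helper: collect while inside, stepping by (sr, sc)
def pvRay : Nat → Int → Int → Int → Int → List Int
  | 0, _, _, _, _ => []
  | n+1, r, c, sr, sc =>
      if pvInside r c then pvRcToIdx r c :: pvRay n (r + sr) (c + sc) sr sc else []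

def line_points_through_alt (index : Int) (dr : Int) (dc : Int) : List Int :=
  let row := PySem.Int.floordiv index 15
  let col := PySem.Int.mod index 15
  (pvRay 20 (row - dr) (col - dc) (-dr) (-dc)).reverse ++ pvRay 20 row col dr dc

-- ===== PRECONDITION & SPEC =====
-- Pre_ excludes only dr = dc = 0 with the index on the board: there Python A's first while
-- loop never terminates (it diverges and returns nothing), and B diverges identically.
def Pre_line_points_through (index : Int) (dr : Int) (dc : Int) : Prop :=
  ¬ (dr = 0 ∧ dc = 0 ∧ 0 ≤ index ∧ index < 225)
instance (index : Int) (dr : Int) (dc : Int) : Decidable (Pre_line_points_through index dr dc) := by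
  unfold Pre_line_points_through; infer_instance

def pvWitness_line_points_through : Int × Int × Int := (16, 1, 1)

def Spec_line_points_through (index : Int) (dr : Int) (dc : Int) (out : List Int) : Prop := out = line_points_through_alt index dr dc
instance (index : Int) (dr : Int) (dc : Int) (out : List Int) : Decidable (Spec_line_points_through index dr dc out) := by unfold Spec_line_points_through; infer_instance

-- ===== CLAIM (what is proved, stated in full; the proofs are below) =====
def Claim_equal_line_points_through : Prop := ∀ (index : Int) (dr : Int) (dc : Int), Dom_line_points_through index dr dc → Pre_line_points_through index dr dc → Spec_line_points_through index dr dc (line_points_through index dr dc)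

-- ===== LEMMAS AND PROOFS =====

lemma pvForwardA_eq_B : ∀ (n : Nat) (r c dr dc : Int),
    pvForwardA n r c dr dc = pvRay n r c dr dc := by
  intro n
  induction n with
  | zero => intro r c dr dc; rfl
  | succ m ih => intro r c dr dc; simp [pvForwardA, pvRay, ih]

lemma pvRay_nil (f : Nat) (r c dr dc : Int) (h : pvInside r c = false) :
    pvRay f r c dr dc = [] := by
  cases f <;> simp [pvRay, h]

-- a line with nonzero step leaves the board within 15 steps
lemma pvInside_off (r c dr dc : Int) (hd : ¬ (dr = 0 ∧ dc = 0)) (h : pvInside r c = true) :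
    pvInside (r + 15 * dr) (c + 15 * dc) = false := by
  simp only [pvInside, decide_eq_true_eq, decide_eq_false_iff_not] at *
  omega

-- fuel irrelevance once an off-board cell is reachable within the fuel
lemma pvRay_stable : ∀ (k : Nat) (f₁ f₂ : Nat) (r c dr dc : Int), k ≤ f₁ → k ≤ f₂ →
    pvInside (r + (k : Int) * dr) (c + (k : Int) * dc) = false →
    pvRay f₁ r c dr dc = pvRay f₂ r c dr dc := by
  intro k
  induction k with
  | zero =>
    intro f₁ f₂ r c dr dc _ _ h
    simp only [Nat.cast_zero, zero_mul, add_zero] at h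
    rw [pvRay_nil _ _ _ _ _ h, pvRay_nil _ _ _ _ _ h]
  | succ m ih =>
    intro f₁ f₂ r c dr dc h₁ h₂ h
    by_cases hin : pvInside r c = true
    · obtain ⟨g₁, rfl⟩ : ∃ g, f₁ = g + 1 := ⟨f₁ - 1, by omega⟩
      obtain ⟨g₂, rfl⟩ : ∃ g, f₂ = g + 1 := ⟨f₂ - 1, by omega⟩
      simp only [pvRay, hin, if_true]
      congr 1
      apply ih g₁ g₂ (r + dr) (c + dc) dr dc (by omega) (by omega)
      have : r + dr + (m : Int) * dr = r + ((m + 1 : Nat) : Int) * dr := by push_cast; ring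
      rw [this]
      have : c + dc + (m : Int) * dc = c + ((m + 1 : Nat) : Int) * dc := by push_cast; ring
      rw [this]
      exact h
    · rw [pvRay_nil _ _ _ _ _ (by simpa using hin),
          pvRay_nil _ _ _ _ _ (by simpa using hin)]

lemma pvRay_20_19 (r c dr dc : Int) (hd : ¬ (dr = 0 ∧ dc = 0)) :
    pvRay 19 r c dr dc = pvRay 20 r c dr dc := by
  by_cases hin : pvInside r c = true
  · exact pvRay_stable 15 19 20 r c dr dc (by omega) (by omega)
      (by exact_mod_cast pvInside_off r c dr dc hd hin)
  · rw [pvRay_nil _ _ _ _ _ (by simpa using hin),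
        pvRay_nil _ _ _ _ _ (by simpa using hin)]

-- the key correspondence: rewind-then-scan = reversed backward scan ++ forward scan
lemma pvKey : ∀ (n : Nat) (r c dr dc : Int), ¬ (dr = 0 ∧ dc = 0) →
    pvForwardA 20 (pvRewind n r c dr dc).1 (pvRewind n r c dr dc).2 dr dc
      = (pvRay n (r - dr) (c - dc) (-dr) (-dc)).reverse ++ pvRay 20 r c dr dc := by
  intro n
  induction n with
  | zero =>
    intro r c dr dc _
    simp [pvRewind, pvRay, pvForwardA_eq_B]
  | succ m ih =>
    intro r c dr dc hd
    by_cases h : pvInside (r - dr) (c - dc) = true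
    · have step : pvRay 20 (r - dr) (c - dc) dr dc
          = pvRcToIdx (r - dr) (c - dc) :: pvRay 20 r c dr dc := by
        show (if pvInside (r - dr) (c - dc) then
          pvRcToIdx (r - dr) (c - dc) :: pvRay 19 (r - dr + dr) (c - dc + dc) dr dc else [])
          = _
        rw [if_pos h]
        have hr : r - dr + dr = r := by ring
        have hc : c - dc + dc = c := by ring
        rw [hr, hc, pvRay_20_19 r c dr dc hd]
      have hback : pvRay (m+1) (r - dr) (c - dc) (-dr) (-dc)
          = pvRcToIdx (r - dr) (c - dc) :: pvRay m (r - dr - dr) (c - dc - dc) (-dr) (-dc) := by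
        show (if pvInside (r - dr) (c - dc) then
          pvRcToIdx (r - dr) (c - dc) :: pvRay m (r - dr + -dr) (c - dc + -dc) (-dr) (-dc) else [])
          = _
        rw [if_pos h]
        have hr : r - dr + -dr = r - dr - dr := by ring
        have hc : c - dc + -dc = c - dc - dc := by ring
        rw [hr, hc]
      simp only [pvRewind, h, if_true]
      rw [ih (r - dr) (c - dc) dr dc hd, step, hback]
      simp
    · have hback : pvRay (m+1) (r - dr) (c - dc) (-dr) (-dc) = [] := by
        simp [pvRay, h]
      simp only [pvRewind, h, Bool.false_eq_true, if_false]
      rw [hback, pvForwardA_eq_B]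
      simp

-- degenerate direction with an off-board start: both sides return []
lemma pvDegenerate (R C : Int) (hin : pvInside R C = false) :
    pvForwardA 20 (pvRewind 20 R C 0 0).1 (pvRewind 20 R C 0 0).2 0 0
      = (pvRay 20 (R - 0) (C - 0) (-0) (-0)).reverse ++ pvRay 20 R C 0 0 := by
  rw [show pvRewind 20 R C 0 0 = (R, C) by simp [pvRewind, hin]]
  rw [show pvRay 20 (R - 0) (C - 0) (-0) (-0) = [] by simp [pvRay, hin]]
  rw [pvForwardA_eq_B, pvRay_nil _ _ _ _ _ hin]
  rfl

-- ===== VERDICT (by name: the statement is the Claim_ definition above) =====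
theorem line_points_through_spec : Claim_equal_line_points_through := by
  intro index dr dc _ hPre
  unfold Spec_line_points_through line_points_through line_points_through_alt
  by_cases hd : dr = 0 ∧ dc = 0
  · -- degenerate direction: Pre_ forces the start cell off the board, both return []
    obtain ⟨h1, h2⟩ := hd
    subst h1; subst h2
    have hrow : PySem.Int.floordiv index 15 < 0 ∨ 15 ≤ PySem.Int.floordiv index 15 := by
      rw [PySem.Int.floordiv_eq_ediv_of_pos (by omega)]
      unfold Pre_line_points_through at hPre
      omega
    have hin : pvInside (PySem.Int.floordiv index 15) (PySem.Int.mod index 15) = false := by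
      simp only [pvInside, decide_eq_false_iff_not]
      omega
    exact pvDegenerate _ _ hin
  · exact pvKey 20 (PySem.Int.floordiv index 15) (PySem.Int.mod index 15) dr dc hd
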